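-- pv_equiv track=rewrite | github.com/EthanV431/pokemon-go-team-comp | src/webScraper.py | cleanBodyText
-- ===== SOURCE A (Python) =====
-- def cleanBodyText(text):
--     chunks = []
--     buf = []
--     newline_count = 0
--
--     for ch in text[14:]:
--         if ch == "\n":
--             newline_count += 1
--             if newline_count % 2 == 0:
--                 chunks.append("".join(buf))
--                 buf = []
--             else:
--                 buf.append("\n")
--         else:
--             buf.append(ch)
--
--     if buf:
--         chunks.append("".join(buf))
--     return chunks
-- ===== SOURCE B (Python) =====
-- def cleanBodyText(text):
--     # simpler: split once on '\n', then join the segments back together in pairs,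
--     # instead of a char-by-char streaming scan with newline-parity state.
--     parts = text[14:].split('\n')
--     chunks = []
--     i = 0
--     while i + 1 < len(parts):
--         chunks.append(parts[i] + '\n' + parts[i + 1])
--         i += 2
--     if i < len(parts) and parts[i]:
--         chunks.append(parts[i])
--     return chunks
-- ===== Notes on version B (the rewrite author's own statement) =====
-- stated objective: faster
-- what changed: Replaces the char-by-char scan with newline-parity state and a growing char buffer by a single split on newline followed by joining the resulting segments back in pairs (a lone non-empty final segment is kept on its own); the per-character Python loop disappears into C-level split/join.
import Mathlib
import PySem

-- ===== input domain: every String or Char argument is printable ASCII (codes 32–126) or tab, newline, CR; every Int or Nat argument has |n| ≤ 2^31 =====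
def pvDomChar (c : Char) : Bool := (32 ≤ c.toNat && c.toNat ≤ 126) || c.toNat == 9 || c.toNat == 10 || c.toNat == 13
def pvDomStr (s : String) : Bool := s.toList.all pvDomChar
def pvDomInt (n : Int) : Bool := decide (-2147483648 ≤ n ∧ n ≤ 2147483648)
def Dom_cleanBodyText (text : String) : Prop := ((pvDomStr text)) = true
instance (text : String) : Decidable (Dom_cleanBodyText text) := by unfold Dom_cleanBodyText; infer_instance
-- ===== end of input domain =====

-- B replaces A's char-by-char newline-parity scan by one split-on-newline plus pairwise re-joining (same O(n), measured constant-factor faster in Python).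

-- ===== PORT A =====
-- one character of A's loop body: state = (chunks, buf, newline_count)
def pvAStep (st : List String × List Char × Int) (ch : Char) : List String × List Char × Int :=
  if ch = '\n' then
    let n := st.2.2 + 1
    if n % 2 == 0 then (st.1 ++ [String.ofList st.2.1], [], n)
    else (st.1, st.2.1 ++ ['\n'], n)
  else (st.1, st.2.1 ++ [ch], st.2.2)

def cleanBodyText (text : String) : List String :=
  let st := (PySem.Str.slice text (some 14) none).toList.foldl pvAStep ([], [], 0)
  if st.2.1 ≠ [] then st.1 ++ [String.ofList st.2.1] else st.1

-- ===== PORT B =====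
-- Source B's while loop walks the parts list two at a time; ported as recursion consuming two parts per step
def pvPairUp : List String → List String
  | a :: b :: rest => (a ++ "\n" ++ b) :: pvPairUp rest
  | [a] => if a ≠ "" then [a] else []
  | [] => []

def cleanBodyText_alt (text : String) : List String :=
  pvPairUp (((PySem.Str.slice text (some 14) none).toList.splitOn '\n').map String.ofList)

-- ===== PRECONDITION & SPEC =====
def Spec_cleanBodyText (text : String) (out : List String) : Prop := out = cleanBodyText_alt text
instance (text : String) (out : List String) : Decidable (Spec_cleanBodyText text out) := by unfold Spec_cleanBodyText; infer_instance

-- ===== CLAIM (what is proved, stated in full; the proofs are below) =====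
def Claim_equal_cleanBodyText : Prop := ∀ (text : String), Dom_cleanBodyText text → Spec_cleanBodyText text (cleanBodyText text)

-- ===== LEMMAS AND PROOFS =====

-- pairing over raw char lists (proof-side mirror of pvPairUp)
def pvPairCh : List (List Char) → List String
  | a :: b :: rest => String.ofList (a ++ '\n' :: b) :: pvPairCh rest
  | [a] => if a ≠ [] then [String.ofList a] else []
  | [] => []

-- A's state at odd newline parity: buf closes at the next newline
def pvCloseOne (buf : List Char) : List (List Char) → List String
  | [] => if buf ≠ [] then [String.ofList buf] else []
  | [s] => if buf ++ s ≠ [] then [String.ofList (buf ++ s)] else []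
  | s :: rest => String.ofList (buf ++ s) :: pvPairCh rest

def pvFinish (st : List String × List Char × Int) : List String :=
  if st.2.1 ≠ [] then st.1 ++ [String.ofList st.2.1] else st.1

theorem pvNl : ("\n" : String) = String.ofList ['\n'] := rfl

theorem pvPairUp_map (parts : List (List Char)) :
    pvPairUp (parts.map String.ofList) = pvPairCh parts := by
  fun_induction pvPairCh parts with
  | case1 a b rest ih =>
      simp only [List.map, pvPairUp, ih]
      rw [pvNl, ← String.ofList_append, ← String.ofList_append]
      simp
  | case2 a h =>
      simp [pvPairUp, String.ofList_eq_empty_iff, h]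
  | case3 a h =>
      simp only [ne_eq, Decidable.not_not] at h
      simp [pvPairUp, h]
  | case4 => rfl

theorem pvStep_nl (chunks : List String) (buf : List Char) (cnt : Int) :
    pvAStep (chunks, buf, cnt) '\n' =
      if (cnt + 1) % 2 = 0 then (chunks ++ [String.ofList buf], [], cnt + 1)
      else (chunks, buf ++ ['\n'], cnt + 1) := by
  simp [pvAStep]

theorem pvStep_ch (chunks : List String) (buf : List Char) (cnt : Int) (c : Char) (h : ¬ c = '\n') :
    pvAStep (chunks, buf, cnt) c = (chunks, buf ++ [c], cnt) := by
  simp [pvAStep, h]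

theorem pvCloseOne_newline (buf : List Char) (parts : List (List Char)) (h : parts ≠ []) :
    pvCloseOne (buf ++ ['\n']) parts = pvPairCh (buf :: parts) := by
  match parts with
  | [] => exact absurd rfl h
  | [s] => simp [pvCloseOne, pvPairCh]
  | s :: r :: rest => simp [pvCloseOne, pvPairCh]

theorem pvMain (cs : List Char) : ∀ (chunks : List String) (buf : List Char) (cnt : Int),
    pvFinish (cs.foldl pvAStep (chunks, buf, cnt)) =
      chunks ++ (if cnt % 2 = 0 then pvPairCh ((cs.splitOn '\n').modifyHead (buf ++ ·))
                 else pvCloseOne buf (cs.splitOn '\n')) := by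
  induction cs with
  | nil =>
      intro chunks buf cnt
      have hm : cnt % 2 = 0 ∨ cnt % 2 = 1 := by omega
      rcases hm with hm | hm <;>
        simp [pvFinish, List.splitOn, List.splitOnP_nil, pvPairCh, pvCloseOne, hm,
          List.modifyHead] <;> split <;> simp_all
  | cons c cs ih =>
      intro chunks buf cnt
      by_cases hc : c = '\n'
      · subst hc
        have hm : cnt % 2 = 0 ∨ cnt % 2 = 1 := by omega
        have hsplit : List.splitOn '\n' ('\n' :: cs) = [] :: List.splitOn '\n' cs := by
          simp [List.splitOn, List.splitOnP_cons]
        rcases hm with hm | hm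
        · have hn : ¬ (cnt + 1) % 2 = 0 := by omega
          rw [List.foldl_cons, pvStep_nl, if_neg hn]
          rw [ih chunks (buf ++ ['\n']) (cnt + 1)]
          rw [if_neg (by omega : ¬ (cnt + 1) % 2 = 0), if_pos hm, hsplit]
          rw [pvCloseOne_newline _ _
            (show List.splitOn '\n' cs ≠ [] from List.splitOnP_ne_nil _ _)]
          simp [List.modifyHead]
        · have hn : (cnt + 1) % 2 = 0 := by omega
          rw [List.foldl_cons, pvStep_nl, if_pos hn]
          rw [ih (chunks ++ [String.ofList buf]) [] (cnt + 1)]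
          rw [if_pos hn, if_neg (by omega : ¬ cnt % 2 = 0), hsplit]
          have hne := List.splitOnP_ne_nil (fun x => x == '\n') cs
          match hP : List.splitOn '\n' cs with
          | [] => exact absurd hP hne
          | [s] => simp [pvCloseOne, pvPairCh, List.modifyHead]
          | s :: r :: rest => simp [pvCloseOne, pvPairCh, List.modifyHead]
      · have hsplit : List.splitOn '\n' (c :: cs) =
            List.modifyHead (fun l => c :: l) (List.splitOn '\n' cs) := by
          simp [List.splitOn, List.splitOnP_cons, hc]
        rw [List.foldl_cons, pvStep_ch _ _ _ _ hc]
        rw [ih chunks (buf ++ [c]) cnt]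
        have hne := List.splitOnP_ne_nil (fun x => x == '\n') cs
        have hm : cnt % 2 = 0 ∨ cnt % 2 = 1 := by omega
        rcases hm with hm | hm <;> simp only [hm, hsplit] <;>
          (match hP : List.splitOn '\n' cs with
           | [] => exact absurd hP hne
           | [s] => simp [pvCloseOne, pvPairCh, List.modifyHead]
           | s :: r :: rest => simp [pvCloseOne, pvPairCh, List.modifyHead])

-- ===== VERDICT (by name: the statement is the Claim_ definition above) =====
theorem cleanBodyText_spec : Claim_equal_cleanBodyText := by
  intro text _
  unfold Spec_cleanBodyText cleanBodyText cleanBodyText_alt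
  rw [show ∀ st : List String × List Char × Int,
        (if st.2.1 ≠ [] then st.1 ++ [String.ofList st.2.1] else st.1) = pvFinish st from fun _ => rfl]
  rw [pvMain, pvPairUp_map]
  have h : ∀ (l : List (List Char)), List.modifyHead (fun x => x) l = l := by
    intro l; cases l <;> rfl
  simp [h]
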